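-- pv_equiv track=rewrite | github.com/aditya-2703/DSA | dynamic_programming/COUNT_BIN_STR.PY | is_consicutive
-- ===== SOURCE A (Python) =====
-- def is_consicutive(string):
--     not_allowed = "1"
--     if len(string)==2:
--         if string[0]==not_allowed and string[1]==not_allowed:
--             return True
--         else:
--             return False
--     for i in range(len(string)-1):
--         if string[i]==not_allowed and string[i+1]==not_allowed:
--             return True
--     return False
-- ===== SOURCE B (Python) =====
-- def is_consicutive(string):
--     # Compute the length of the longest run of consecutive '1's,
--     # then answer whether that maximal run has length at least 2.
--     best = 0
--     cur = 0
--     for ch in string: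
--         cur = cur + 1 if ch == '1' else 0
--         if cur > best:
--             best = cur
--     return best >= 2
-- ===== Notes on version B (the rewrite author's own statement) =====
-- stated objective: alternative
-- what changed: B computes the maximal run length of consecutive '1's with a (best, current-run) accumulator and returns best >= 2, instead of A's indexed scan for an adjacent pair with a redundant len==2 special case.
import Mathlib
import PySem

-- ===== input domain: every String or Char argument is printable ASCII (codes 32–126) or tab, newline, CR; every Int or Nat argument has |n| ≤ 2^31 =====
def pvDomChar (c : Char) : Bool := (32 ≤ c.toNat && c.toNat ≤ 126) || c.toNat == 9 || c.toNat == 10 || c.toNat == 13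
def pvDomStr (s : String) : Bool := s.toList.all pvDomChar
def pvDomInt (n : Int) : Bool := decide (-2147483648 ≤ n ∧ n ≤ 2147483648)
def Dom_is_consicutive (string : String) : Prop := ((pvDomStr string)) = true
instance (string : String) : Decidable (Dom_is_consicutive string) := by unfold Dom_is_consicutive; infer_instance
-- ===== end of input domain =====

-- B computes the maximal run length of consecutive '1's and compares it with 2, instead of A's indexed adjacent-pair scan (alternative decomposition, same cost).

-- ===== PORT A =====
def is_consicutive (string : String) : Bool :=
  if string.toList.length = 2 then
    -- if string[0]==not_allowed and string[1]==not_allowed: True else False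
    decide (PySem.List.pyGet? string.toList 0 = some '1' ∧ PySem.List.pyGet? string.toList 1 = some '1')
  else
    -- for i in range(len(string)-1): if string[i]=='1' and string[i+1]=='1': return True; return False
    (PySem.List.pyRange 0 ((string.toList.length : Int) - 1) 1).any (fun i =>
      PySem.List.pyGet? string.toList i == some '1' && PySem.List.pyGet? string.toList (i + 1) == some '1')

-- ===== PORT B =====
-- best = 0; cur = 0; for ch in string: cur = cur+1 if ch=='1' else 0; if cur > best: best = cur; return best >= 2
def is_consicutive_alt (string : String) : Bool :=
  let p := string.toList.foldl (fun (st : Nat × Nat) ch =>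
    let cur := if ch = '1' then st.2 + 1 else 0
    (if cur > st.1 then cur else st.1, cur)) (0, 0)
  decide (p.1 ≥ 2)

-- ===== PRECONDITION & SPEC =====
def Spec_is_consicutive (string : String) (out : Bool) : Prop := out = is_consicutive_alt string
instance (string : String) (out : Bool) : Decidable (Spec_is_consicutive string out) := by unfold Spec_is_consicutive; infer_instance

-- ===== CLAIM (what is proved, stated in full; the proofs are below) =====
def Claim_equal_is_consicutive : Prop := ∀ (string : String), Dom_is_consicutive string → Spec_is_consicutive string (is_consicutive string)

-- ===== LEMMAS AND PROOFS =====

-- a two-element prefix is exactly the first two optional elements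
theorem prefix11_iff (l : List Char) :
    ['1', '1'] <+: l ↔ l[0]? = some '1' ∧ l[1]? = some '1' := by
  match l with
  | [] => simp
  | [a] => simp
  | a :: b :: t =>
    constructor
    · rintro ⟨u, hu⟩
      simp_all
      exact ⟨hu.1.symm, hu.2.1.symm⟩
    · rintro ⟨h0, h1⟩
      simp_all

-- A's adjacent-'1'-pair scan, characterised as infix presence of "11"
theorem scan_iff (cs : List Char) :
    ((PySem.List.pyRange 0 ((cs.length : Int) - 1) 1).any (fun i =>
      PySem.List.pyGet? cs i == some '1' && PySem.List.pyGet? cs (i + 1) == some '1')) = true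
    ↔ ['1', '1'] <:+: cs := by
  have hinf : (['1', '1'] <:+: cs) ↔ ∃ j : Nat, ['1', '1'] <+: cs.drop j := by
    rw [← PySem.Chars.isIn_iff_infix, ← PySem.Chars.exists_prefix_drop_iff_isIn]
  rw [List.any_eq_true, hinf]
  constructor
  · rintro ⟨i, hi, hp⟩
    rw [PySem.List.mem_pyRange_one] at hi
    obtain ⟨h0, h1⟩ := hi
    simp only [Bool.and_eq_true, beq_iff_eq] at hp
    obtain ⟨p0, p1⟩ := hp
    rw [PySem.List.pyGet?_of_nonneg cs h0] at p0
    rw [PySem.List.pyGet?_of_nonneg cs (by omega)] at p1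
    refine ⟨i.toNat, (prefix11_iff _).mpr ⟨?_, ?_⟩⟩
    · rw [List.getElem?_drop]; simpa using p0
    · rw [List.getElem?_drop]
      have : (i + 1).toNat = i.toNat + 1 := by omega
      rw [this] at p1; simpa using p1
  · rintro ⟨j, hp⟩
    rw [prefix11_iff, List.getElem?_drop, List.getElem?_drop] at hp
    obtain ⟨p0, p1⟩ := hp
    have hj1 : j + 1 < cs.length := (List.getElem?_eq_some_iff.mp p1).1
    refine ⟨(j : Int), ?_, ?_⟩
    · rw [PySem.List.mem_pyRange_one]; constructor <;> omega
    · simp only [Bool.and_eq_true, beq_iff_eq]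
      constructor
      · rw [PySem.List.pyGet?_natCast]; simpa using p0
      · have : ((j : Int) + 1) = ((j + 1 : Nat) : Int) := by omega
        rw [this, PySem.List.pyGet?_natCast]; simpa using p1

-- A's len==2 special case, also characterised as infix presence of "11"
theorem two_iff (cs : List Char) (h2 : cs.length = 2) :
    decide (PySem.List.pyGet? cs 0 = some '1' ∧ PySem.List.pyGet? cs 1 = some '1') = true
    ↔ ['1', '1'] <:+: cs := by
  obtain ⟨a, b, rfl⟩ := List.length_eq_two.mp h2
  simp [PySem.List.pyGet?, PySem.List.pyIdx?]
  constructor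
  · rintro ⟨rfl, rfl⟩; exact List.infix_rfl
  · intro h
    have := h.eq_of_length (by simp)
    simp_all
    exact ⟨this.1.symm, this.2.symm⟩

-- the run-length fold: invariant relating (best, cur) to infix presence of "11"
theorem fold_ge2 (l : List Char) : ∀ (b c : Nat),
    2 ≤ (l.foldl (fun (st : Nat × Nat) ch =>
      ((if (if ch = '1' then st.2 + 1 else 0) > st.1 then (if ch = '1' then st.2 + 1 else 0) else st.1),
        if ch = '1' then st.2 + 1 else 0)) (b, c)).1
    ↔ 2 ≤ b ∨ (1 ≤ c ∧ l[0]? = some '1') ∨ ['1', '1'] <:+: l := by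
  induction l with
  | nil =>
    intro b c
    simp only [List.foldl_nil, List.getElem?_nil]
    constructor
    · exact Or.inl
    · rintro (h | ⟨_, h⟩ | h)
      · exact h
      · exact absurd h (by simp)
      · exact absurd h.length_le (by simp)
  | cons ch t ih =>
    intro b c
    rw [List.foldl_cons, ih, List.infix_cons_iff, prefix11_iff]
    by_cases hch : ch = '1'
    · subst hch
      simp only [if_pos rfl, List.getElem?_cons_zero, List.getElem?_cons_succ]
      by_cases hh : t[0]? = some '1' <;> by_cases hinf : ['1','1'] <:+: t <;>
        simp only [hh, hinf] <;> split_ifs <;> simp <;> omega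
    · simp only [if_neg hch, List.getElem?_cons_zero, List.getElem?_cons_succ]
      have h0 : (some ch = some '1') ↔ False := by simp [hch]
      by_cases hinf : ['1','1'] <:+: t <;>
        simp only [hinf, h0] <;> split_ifs <;> simp <;> omega

-- ===== VERDICT (by name: the statement is the Claim_ definition above) =====
theorem is_consicutive_spec : Claim_equal_is_consicutive := by
  intro s _
  unfold Spec_is_consicutive is_consicutive is_consicutive_alt
  rw [Bool.eq_iff_iff]
  simp only [decide_eq_true_eq, ge_iff_le]
  rw [fold_ge2]
  split
  · next h2 => rw [two_iff s.toList h2]; simp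
  · next h2 => rw [scan_iff s.toList]; simp
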